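-- pv_equiv track=rewrite | github.com/TomasPhilippart/MDTools | func_aux.py | soma_pot_2_aux
-- ===== SOURCE A (Python) =====
-- def soma_pot_2_aux(x):
--     v = []
--     # Converting the decimal number
--     # into its binary equivalent.
--     while (x > 0):
--         v.append(int(x % 2))
--         x = int(x / 2)
--
--     powers = []
--     # Displaying the output when
--     # the bit is '1' in binary
--     # equivalent of number.
--     for i in range(0, len(v)):
--         if (v[i] == 1):
--             powers = [i] + powers
--
--     return powers
-- ===== SOURCE B (Python) =====
-- def soma_pot_2_aux(x):
--     if x <= 0:
--         return []
--     res = []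
--     for i in range(x.bit_length() - 1, -1, -1):
--         if (x >> i) & 1:
--             res.append(i)
--     return res
-- ===== Notes on version B (the rewrite author's own statement) =====
-- stated objective: simpler
-- what changed: B replaces A's two-phase build-a-bit-list-then-rescan-with-prepends by a single descending loop over bit positions (bit_length-1 down to 0) appending each set-bit index, so the descending output is produced directly with no intermediate list.
import Mathlib
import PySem

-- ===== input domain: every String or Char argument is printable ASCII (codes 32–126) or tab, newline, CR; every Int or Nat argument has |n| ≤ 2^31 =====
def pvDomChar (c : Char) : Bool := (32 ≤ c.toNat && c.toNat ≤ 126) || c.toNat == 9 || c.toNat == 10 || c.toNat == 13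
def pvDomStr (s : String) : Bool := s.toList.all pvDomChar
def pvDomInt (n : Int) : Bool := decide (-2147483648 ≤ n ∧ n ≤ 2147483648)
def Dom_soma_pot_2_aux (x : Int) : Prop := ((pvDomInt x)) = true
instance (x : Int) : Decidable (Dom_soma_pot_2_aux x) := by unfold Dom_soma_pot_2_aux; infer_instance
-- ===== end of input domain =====

-- B replaces A's build-a-bit-list-then-rescan-with-prepends by one descending loop over bit
-- positions appending each set-bit index (objective: simpler).

-- ===== PORT A =====
-- the while loop building v; int(x / 2) = x // 2 exactly here, since |x| ≤ 2^31 keeps x / 2 exact in float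
def somaBits (x : Int) : List Int :=
  if 0 < x then PySem.Int.mod x 2 :: somaBits (PySem.Int.floordiv x 2) else []
termination_by x.toNat
decreasing_by
  rw [PySem.Int.floordiv_eq_ediv_of_pos (by omega)]; omega

def soma_pot_2_aux (x : Int) : List Int :=
  let v := somaBits x
  (PySem.List.pyRange 0 (v.length : Int) 1).foldl
    (fun powers i => if PySem.List.pyGetD v i 0 = 1 then [i] ++ powers else powers) []

-- ===== PORT B =====
def soma_pot_2_aux_alt (x : Int) : List Int :=
  if x ≤ 0 then []
  else
    (PySem.List.pyRange ((PySem.Int.bitLength x : Int) - 1) (-1) (-1)).foldl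
      (fun res i => if PySem.Int.band (Int.shiftRight x i.toNat) 1 ≠ 0 then res ++ [i] else res) []  -- x >> i, shift amount as Nat

-- ===== PRECONDITION & SPEC =====
def Spec_soma_pot_2_aux (x : Int) (out : List Int) : Prop := out = soma_pot_2_aux_alt x
instance (x : Int) (out : List Int) : Decidable (Spec_soma_pot_2_aux x out) := by unfold Spec_soma_pot_2_aux; infer_instance

-- ===== CLAIM (what is proved, stated in full; the proofs are below) =====
def Claim_equal_soma_pot_2_aux : Prop := ∀ (x : Int), Dom_soma_pot_2_aux x → Spec_soma_pot_2_aux x (soma_pot_2_aux x)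

-- ===== LEMMAS AND PROOFS =====

-- A's bit list, restated over Nat input (values are the Int bits)
def bitsN (n : Nat) : List Int :=
  if n = 0 then [] else ((n % 2 : Nat) : Int) :: bitsN (n / 2)
termination_by n
decreasing_by omega

theorem somaBits_eq (x : Int) : somaBits x = bitsN x.toNat := by
  generalize hn : x.toNat = n
  induction n using Nat.strong_induction_on generalizing x with
  | _ n ih =>
    rw [somaBits, bitsN]
    by_cases hx : 0 < x
    · have hn0 : ¬ n = 0 := by omega
      have hxn : x = (n : Int) := by omega
      subst hxn
      have hm : PySem.Int.mod (n : Int) 2 = ((n % 2 : Nat) : Int) := by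
        rw [PySem.Int.mod_eq_emod_of_pos (by omega)]; exact_mod_cast rfl
      have hd : PySem.Int.floordiv (n : Int) 2 = ((n / 2 : Nat) : Int) := by
        rw [PySem.Int.floordiv_eq_ediv_of_pos (by omega)]; exact_mod_cast rfl
      rw [if_pos hx, if_neg hn0, hm, hd]
      congr 1
      exact ih (n / 2) (by omega) ((n / 2 : Nat) : Int) (by omega)
    · have hn0 : n = 0 := by omega
      rw [if_neg hx, if_pos hn0]

theorem bitsN_len (n : Nat) : (bitsN n).length = PySem.Int.bitLength (n : Int) := by
  induction n using Nat.strong_induction_on with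
  | _ n ih =>
    rw [bitsN]
    by_cases h : n = 0
    · simp [h]
    · rw [if_neg h, List.length_cons, ih (n / 2) (by omega),
        PySem.Int.bitLength_natCast (m := n) (by omega)]

theorem bitsN_get (n i : Nat) (h : i < (bitsN n).length) :
    (bitsN n)[i]? = some ((n / 2 ^ i % 2 : Nat) : Int) := by
  induction n using Nat.strong_induction_on generalizing i with
  | _ n ih =>
    by_cases h0 : n = 0
    · rw [bitsN] at h; simp [h0] at h
    · have hc : bitsN n = ((n % 2 : Nat) : Int) :: bitsN (n / 2) := by rw [bitsN, if_neg h0]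
      rw [hc] at h ⊢
      cases i with
      | zero => simp
      | succ i =>
        rw [List.getElem?_cons_succ, ih (n / 2) (by omega) i (by simpa using h)]
        rw [Nat.div_div_eq_div_mul, ← pow_succ']

-- A's loop shape: prepend-if over a list is the reversed filter
theorem foldl_cons_ite {α : Type} (p : α → Prop) [DecidablePred p] (l : List α) (acc : List α) :
    l.foldl (fun acc i => if p i then [i] ++ acc else acc) acc
      = (l.filter (fun i => decide (p i))).reverse ++ acc := by
  induction l generalizing acc with
  | nil => simp
  | cons a t ihl =>
    rw [List.foldl_cons, List.filter_cons, ihl]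
    by_cases hp : p a <;> simp [hp]

-- ===== VERDICT (by name: the statement is the Claim_ definition above) =====
theorem soma_pot_2_aux_spec : Claim_equal_soma_pot_2_aux := by
  unfold Claim_equal_soma_pot_2_aux
  intro x _
  unfold Spec_soma_pot_2_aux
  simp only [soma_pot_2_aux, soma_pot_2_aux_alt]
  by_cases hx : x <= 0
  · have hb : somaBits x = [] := by rw [somaBits, if_neg (by omega)]
    rw [if_pos hx, hb]
    simp [PySem.List.pyRange_one_eq_nil]
  · rw [if_neg hx]
    have hx' : 0 < x := by omega
    obtain ⟨n, rfl⟩ : ∃ n : Nat, x = (n : Int) := ⟨x.toNat, by omega⟩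
    have hv : somaBits (n : Int) = bitsN n := by
      have := somaBits_eq (n : Int); rwa [Int.toNat_natCast] at this
    have hlen : (((somaBits (n : Int)).length : Nat) : Int)
        = ((PySem.Int.bitLength (n : Int) : Nat) : Int) := by
      rw [hv, bitsN_len]
    have hrange : PySem.List.pyRange ((PySem.Int.bitLength (n : Int) : Int) - 1) (-1) (-1)
        = (PySem.List.pyRange 0 (PySem.Int.bitLength (n : Int) : Int) 1).reverse := by
      have h1 : ((PySem.Int.bitLength (n : Int) : Int)) - 1 + 1
          = (PySem.Int.bitLength (n : Int) : Int) := by ring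
      rw [PySem.List.pyRange_neg_one_eq_reverse, h1]
      norm_num
    rw [hrange, foldl_cons_ite, PySem.List.foldl_append_ite_eq_filter,
      List.filter_reverse, List.nil_append, List.append_nil, hlen]
    congr 1
    apply List.filter_congr
    intro i hi
    rw [PySem.List.mem_pyRange_one] at hi
    obtain ⟨hi0, hiu⟩ := hi
    have hklt : i.toNat < (bitsN n).length := by
      rw [bitsN_len]; omega
    have hg : (bitsN n)[i.toNat] = ((n / 2 ^ i.toNat % 2 : Nat) : Int) := by
      have := bitsN_get n i.toNat hklt
      rwa [List.getElem?_eq_getElem hklt, Option.some_inj] at this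
    have hget : PySem.List.pyGetD (somaBits (n : Int)) i 0
        = ((n / 2 ^ i.toNat % 2 : Nat) : Int) := by
      rw [hv, PySem.List.pyGetD_eq_getElem _ _ hi0 (by omega), hg]
    have hshift : Int.shiftRight ((n : Int)) i.toNat = ((n >>> i.toNat : Nat) : Int) := rfl
    have hband : PySem.Int.band (Int.shiftRight ((n : Int)) i.toNat) 1
        = ((n / 2 ^ i.toNat % 2 : Nat) : Int) := by
      rw [hshift, show (1 : Int) = ((1 : Nat) : Int) from rfl, PySem.Int.band_natCast,
        Nat.and_one_is_mod, Nat.shiftRight_eq_div_pow]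
    rw [hget, hband]
    rcases Nat.mod_two_eq_zero_or_one (n / 2 ^ i.toNat) with h2 | h2 <;> simp [h2]
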